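-- pv_equiv track=rewrite | github.com/fury-r/python-codes | rev.py | revStringOpt
-- ===== SOURCE A (Python) =====
-- def revStringOpt(a):
--     h,t=0,len(a)-1
--     a=list(a)
--     vowel='aieou'
--     while h<t:
--         if a[h] not  in vowel and a[t] not in vowel:
--             a[h],a[t]=a[t],a[h]
--             h+=1
--             t-=1
--         else:
--             if a[h] in vowel:
--                 h+=1
--             if a[t] in vowel:
--                 t-=1
--     return "".join(a)
-- ===== SOURCE B (Python) =====
-- def revStringOpt(a):
--     vowel = 'aieou'
--     cons = [c for c in a if c not in vowel]
--     return "".join(c if c in vowel else cons.pop() for c in a)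
-- ===== Notes on version B (the rewrite author's own statement) =====
-- stated objective: simpler
-- what changed: Replaces the converging two-pointer in-place swap over the char array by two forward passes: collect the consonants (characters not in 'aieou') once, then rebuild the string popping consonants from the end of that buffer while vowels stay in place.
import Mathlib
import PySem

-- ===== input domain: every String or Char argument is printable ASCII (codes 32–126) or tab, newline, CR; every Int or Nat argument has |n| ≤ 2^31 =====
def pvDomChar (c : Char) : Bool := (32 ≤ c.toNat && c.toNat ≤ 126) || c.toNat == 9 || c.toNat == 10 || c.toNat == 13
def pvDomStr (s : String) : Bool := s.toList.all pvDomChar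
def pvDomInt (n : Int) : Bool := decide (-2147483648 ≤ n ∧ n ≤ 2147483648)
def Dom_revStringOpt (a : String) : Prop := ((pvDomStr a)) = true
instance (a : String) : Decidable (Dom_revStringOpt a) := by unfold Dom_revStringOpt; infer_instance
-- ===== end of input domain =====

-- B replaces A's converging two-pointer in-place swap by two forward passes over a separate
-- consonant buffer (simpler decomposition; equivalence is about the return value).

-- shared helper: Python's `c in 'aieou'`
def isVowel (c : Char) : Bool := c = 'a' || c = 'i' || c = 'e' || c = 'o' || c = 'u'

-- ===== PORT A =====
-- the while loop; fuel = (t-h).toNat + 1 bounds the iteration count (each pass decreases t-h by ≥ 1)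
def revAuxA : Nat → List Char → Int → Int → List Char
  | 0, a, _, _ => a
  | fuel+1, a, h, t =>
    if h < t then
      let ch := PySem.List.pyGetD a h ' '   -- a[h]; always in range while h < t
      let ct := PySem.List.pyGetD a t ' '   -- a[t]
      if !isVowel ch && !isVowel ct then
        revAuxA fuel (PySem.List.pySetD (PySem.List.pySetD a h ct) t ch) (h+1) (t-1)
      else
        let h' := if isVowel ch then h + 1 else h
        let t' := if isVowel ct then t - 1 else t
        revAuxA fuel a h' t'
    else a

def revStringOpt (a : String) : String :=
  let l := a.toList
  String.ofList (revAuxA ((((l.length : Int) - 1) - 0).toNat + 1) l 0 ((l.length : Int) - 1))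

-- ===== PORT B =====
-- `cons.pop()`: emit the last remaining collected consonant (the empty case is unreachable,
-- the buffer holds exactly one entry per consonant of the string; defaulted to keep the port total)
def popRefill : List Char → List Char → List Char
  | [], _ => []
  | x :: xs, cs =>
    if isVowel x then x :: popRefill xs cs
    else (cs.getLast?.getD x) :: popRefill xs cs.dropLast

def revStringOpt_alt (a : String) : String :=
  let cons := a.toList.filter (fun c => !isVowel c)
  String.ofList (popRefill a.toList cons)

-- ===== PRECONDITION & SPEC =====
def Spec_revStringOpt (a : String) (out : String) : Prop := out = revStringOpt_alt a
instance (a : String) (out : String) : Decidable (Spec_revStringOpt a out) := by unfold Spec_revStringOpt; infer_instance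

-- ===== CLAIM (what is proved, stated in full; the proofs are below) =====
def Claim_equal_revStringOpt : Prop := ∀ (a : String), Dom_revStringOpt a → Spec_revStringOpt a (revStringOpt a)

-- ===== LEMMAS AND PROOFS =====

-- head-consumption form of B's rebuild pass: popRefill xs cs = refill xs cs.reverse
def refill : List Char → List Char → List Char
  | [], _ => []
  | x :: xs, cs =>
    if isVowel x then x :: refill xs cs
    else (cs.headD x) :: refill xs cs.tail

theorem popRefill_eq_refill (xs : List Char) : ∀ cs, popRefill xs cs = refill xs cs.reverse := by
  induction xs with
  | nil => intro cs; rfl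
  | cons x xs ih =>
    intro cs
    simp only [popRefill, refill]
    by_cases hv : isVowel x
    · simp [hv, ih]
    · simp only [hv, Bool.false_eq_true, ite_false]
      rw [ih cs.dropLast, List.tail_reverse]
      congr 1
      rw [List.headD_eq_head?_getD, List.head?_reverse]

theorem length_refill (xs : List Char) : ∀ cs, (refill xs cs).length = xs.length := by
  induction xs with
  | nil => intro cs; rfl
  | cons x xs ih => intro cs; simp only [refill]; split <;> simp [ih]

-- number of consonants
def cntC (xs : List Char) : Nat := (xs.filter (fun c => !isVowel c)).length

theorem refill_getElem?_vowel (xs : List Char) : ∀ (cs : List Char) (i : Nat) (hi : i < xs.length),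
    isVowel (xs[i]'hi) = true → (refill xs cs)[i]? = some (xs[i]'hi) := by
  induction xs with
  | nil => intro cs i hi; simp at hi
  | cons x xs ih =>
    intro cs i hi hv
    cases i with
    | zero =>
      simp only [List.getElem_cons_zero] at hv
      simp [refill, hv]
    | succ n =>
      simp only [List.getElem_cons_succ] at hv
      simp only [refill]
      split <;> simp [ih _ n (by simpa using hi) hv]

theorem refill_getElem?_cons (xs : List Char) : ∀ (cs : List Char) (i : Nat) (hi : i < xs.length),
    isVowel (xs[i]'hi) = false → cntC (xs.take i) < cs.length →
    (refill xs cs)[i]? = cs[cntC (xs.take i)]? := by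
  induction xs with
  | nil => intro cs i hi; simp at hi
  | cons x xs ih =>
    intro cs i hi hv hk
    cases i with
    | zero =>
      simp only [List.getElem_cons_zero] at hv
      simp only [cntC, List.take_zero, List.filter_nil, List.length_nil] at hk ⊢
      cases cs with
      | nil => simp at hk
      | cons c cs' => simp [refill, hv]
    | succ n =>
      simp only [List.getElem_cons_succ] at hv
      simp only [cntC, List.take_succ_cons, List.filter_cons] at hk ⊢
      by_cases hx : isVowel x
      · simp only [hx, Bool.not_true, Bool.false_eq_true, ite_false] at hk ⊢
        simp only [refill, hx, ite_true, List.getElem?_cons_succ]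
        exact ih cs n (by simpa using hi) hv hk
      · simp only [hx, Bool.not_false, ite_true, List.length_cons] at hk ⊢
        simp only [refill, hx, Bool.false_eq_true, ite_false, List.getElem?_cons_succ]
        cases cs with
        | nil => simp at hk
        | cons c cs' =>
          simp only [List.length_cons, Nat.add_lt_add_iff_right] at hk
          simp only [List.tail_cons]
          rw [ih cs' n (by simpa using hi) hv hk]
          simp [cntC, List.getElem?_cons_succ]

theorem cntC_take_drop (l : List Char) (j : Nat) : cntC (l.take j) + cntC (l.drop j) = cntC l := by
  simp [cntC]
  rw [← List.length_append, ← List.filter_append, List.take_append_drop]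

theorem cntC_drop_succ (l : List Char) (j : Nat) (hj : j < l.length) :
    cntC (l.drop j) = (if isVowel (l[j]'hj) then 0 else 1) + cntC (l.drop (j+1)) := by
  rw [List.drop_eq_getElem_cons hj]
  simp only [cntC, List.filter_cons]
  by_cases hv : isVowel (l[j]'hj) <;> simp [hv, Nat.add_comm]

theorem cntC_take_succ (l : List Char) (j : Nat) (hj : j < l.length) :
    cntC (l.take (j+1)) = cntC (l.take j) + (if isVowel (l[j]'hj) then 0 else 1) := by
  rw [List.take_add_one, List.getElem?_eq_getElem hj]
  simp only [cntC, Option.toList_some, List.filter_append, List.filter_cons, List.filter_nil,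
    List.length_append]
  by_cases hv : isVowel (l[j]'hj) <;> simp [hv]

-- the consonant buffer indexed at the rank of a consonant position gives that consonant
theorem cs_getElem?_at (l : List Char) (j : Nat) (hj : j < l.length)
    (hc : isVowel (l[j]'hj) = false) :
    (l.filter (fun c => !isVowel c))[cntC (l.take j)]? = some (l[j]'hj) := by
  have hdecomp : l.filter (fun c => !isVowel c)
      = (l.take j).filter (fun c => !isVowel c)
        ++ (l[j]'hj) :: (l.drop (j+1)).filter (fun c => !isVowel c) := by
    conv_lhs => rw [← List.take_append_drop j l]
    rw [List.filter_append, List.drop_eq_getElem_cons hj, List.filter_cons]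
    simp [hc]
  rw [hdecomp, cntC, List.getElem?_append_right (le_refl _)]
  simp

-- the common value of both programs
def target (l : List Char) : List Char := refill l ((l.filter (fun c => !isVowel c)).reverse)

theorem length_target (l : List Char) : (target l).length = l.length := length_refill _ _

theorem target_getElem?_vowel (l : List Char) (j : Nat) (hj : j < l.length)
    (hv : isVowel (l[j]'hj) = true) : (target l)[j]? = some (l[j]'hj) :=
  refill_getElem?_vowel l _ j hj hv

theorem target_getElem?_consonant (l : List Char) (j : Nat) (hj : j < l.length)
    (hc : isVowel (l[j]'hj) = false) :
    (target l)[j]? = (l.filter (fun c => !isVowel c))[cntC (l.drop (j+1))]? := by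
  have hm : cntC l = cntC (l.take j) + 1 + cntC (l.drop (j+1)) := by
    have h1 := cntC_take_drop l j
    have h2 := cntC_drop_succ l j hj
    rw [hc] at h2
    simp at h2
    omega
  have hlt : cntC (l.take j) < (l.filter (fun c => !isVowel c)).length := by
    show cntC (l.take j) < cntC l
    omega
  rw [target, refill_getElem?_cons l _ j hj hc (by simpa using hlt)]
  rw [List.getElem?_reverse hlt]
  congr 1
  show (cntC l) - 1 - cntC (l.take j) = _
  omega

-- main loop invariant of port A: away from [h,t] the array already agrees with the target,
-- inside [h,t] it is still the original, and the consonant counts left of h / right of t match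
theorem revAuxA_invariant (l : List Char) :
    ∀ (fuel : Nat) (a : List Char) (h t : Int),
      a.length = l.length → 0 ≤ h → t < (l.length : Int) →
      (t - h).toNat < fuel →
      (∀ i : Nat, i < l.length → ((i : Int) < h ∨ t < (i : Int)) → a[i]? = (target l)[i]?) →
      (∀ i : Nat, i < l.length → (h ≤ (i : Int) ∧ (i : Int) ≤ t) → a[i]? = l[i]?) →
      cntC (l.take h.toNat) = cntC (l.drop (t + 1).toNat) →
      revAuxA fuel a h t = target l := by
  intro fuel
  induction fuel with
  | zero => intro a h t _ _ _ h4 _ _ _; omega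
  | succ fuel ih =>
    intro a h t hlen h0 htlen hfuel hout hin hcnt
    by_cases hlt : h < t
    · have hhl : h.toNat < l.length := by omega
      have htl : t.toNat < l.length := by omega
      have hhal : h.toNat < a.length := by omega
      have htal : t.toNat < a.length := by omega
      have hch : PySem.List.pyGetD a h ' ' = l[h.toNat]'hhl := by
        rw [PySem.List.pyGetD_eq_getElem a ' ' h0 (by omega)]
        have h1 := hin h.toNat hhl ⟨by omega, by omega⟩
        rw [List.getElem?_eq_getElem hhal, List.getElem?_eq_getElem hhl] at h1
        exact Option.some.inj h1
      have hct : PySem.List.pyGetD a t ' ' = l[t.toNat]'htl := by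
        rw [PySem.List.pyGetD_eq_getElem a ' ' (by omega) (by omega)]
        have h1 := hin t.toNat htl ⟨by omega, by omega⟩
        rw [List.getElem?_eq_getElem htal, List.getElem?_eq_getElem htl] at h1
        exact Option.some.inj h1
      have hT1 : (t + 1).toNat = t.toNat + 1 := by omega
      rw [hT1] at hcnt
      have c1 := cntC_take_succ l h.toNat hhl
      have c2 := cntC_drop_succ l t.toNat htl
      have c3 := cntC_take_drop l h.toNat
      have c4 := cntC_take_drop l t.toNat
      have c5 := cntC_drop_succ l h.toNat hhl
      simp only [revAuxA, if_pos hlt, hch, hct]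
      cases hvh : isVowel (l[h.toNat]'hhl) <;> cases hvt : isVowel (l[t.toNat]'htl) <;>
        rw [hvh] at c1 c5 <;> rw [hvt] at c2 <;>
        simp only [Bool.false_eq_true, reduceIte] at c1 c2 c5
      -- case 1: both consonants → swap
      · simp only [Bool.not_false, Bool.and_self, if_pos]
        rw [PySem.List.pySetD_of_nonneg a _ h0, PySem.List.pySetD_of_nonneg _ _ (by omega : (0:Int) ≤ t)]
        have f3a : (target l)[h.toNat]? = some (l[t.toNat]'htl) := by
          rw [target_getElem?_consonant l h.toNat hhl hvh]
          have e2 := cs_getElem?_at l t.toNat htl hvt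
          have heq : cntC (l.drop (h.toNat + 1)) = cntC (l.take t.toNat) := by omega
          rw [heq]; exact e2
        have f3b : (target l)[t.toNat]? = some (l[h.toNat]'hhl) := by
          rw [target_getElem?_consonant l t.toNat htl hvt]
          have e2 := cs_getElem?_at l h.toNat hhl hvh
          have heq : cntC (l.drop (t.toNat + 1)) = cntC (l.take h.toNat) := by omega
          rw [heq]; exact e2
        apply ih _ (h+1) (t-1)
        · simp [hlen]
        · omega
        · omega
        · omega
        · intro i hi hcase
          rw [List.getElem?_set, List.getElem?_set]
          simp only [List.length_set]
          by_cases hit : i = t.toNat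
          · subst hit
            rw [if_pos rfl, if_pos htal]
            exact f3b.symm
          · rw [if_neg (fun hh => hit hh.symm)]
            by_cases hih : i = h.toNat
            · subst hih
              rw [if_pos rfl, if_pos hhal]
              exact f3a.symm
            · rw [if_neg (fun hh => hih hh.symm)]
              exact hout i hi (by omega)
        · intro i hi hrange
          rw [List.getElem?_set, List.getElem?_set,
            if_neg (by omega : ¬ t.toNat = i), if_neg (by omega : ¬ h.toNat = i)]
          exact hin i hi ⟨by omega, by omega⟩
        · have e1 : (h + 1).toNat = h.toNat + 1 := by omega
          have e2 : (t - 1 + 1).toNat = t.toNat := by omega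
          rw [e1, e2]
          omega
      -- case 2: h consonant, t vowel → t -= 1
      · simp only [Bool.not_false, Bool.not_true, Bool.and_false, Bool.false_eq_true, ite_false]
        apply ih a h (t-1) hlen h0 (by omega) (by omega)
        · intro i hi hcase
          by_cases hit : i = t.toNat
          · subst hit
            rw [hin t.toNat hi ⟨by omega, by omega⟩, List.getElem?_eq_getElem hi,
              target_getElem?_vowel l t.toNat hi hvt]
          · exact hout i hi (by omega)
        · intro i hi hrange
          exact hin i hi ⟨by omega, by omega⟩
        · rw [(by omega : (t - 1 + 1).toNat = t.toNat)]
          omega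
      -- case 3: h vowel, t consonant → h += 1
      · simp only [Bool.not_true, Bool.false_and, Bool.false_eq_true, ite_false]
        apply ih a (h+1) t hlen (by omega) (by omega) (by omega)
        · intro i hi hcase
          by_cases hih : i = h.toNat
          · subst hih
            rw [hin h.toNat hi ⟨by omega, by omega⟩, List.getElem?_eq_getElem hi,
              target_getElem?_vowel l h.toNat hi hvh]
          · exact hout i hi (by omega)
        · intro i hi hrange
          exact hin i hi ⟨by omega, by omega⟩
        · rw [(by omega : (h + 1).toNat = h.toNat + 1), hT1]
          omega
      -- case 4: both vowels → h += 1, t -= 1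
      · simp only [Bool.not_true, Bool.false_and, Bool.false_eq_true, ite_false]
        apply ih a (h+1) (t-1) hlen (by omega) (by omega) (by omega)
        · intro i hi hcase
          by_cases hih : i = h.toNat
          · subst hih
            rw [hin h.toNat hi ⟨by omega, by omega⟩, List.getElem?_eq_getElem hi,
              target_getElem?_vowel l h.toNat hi hvh]
          · by_cases hit : i = t.toNat
            · subst hit
              rw [hin t.toNat hi ⟨by omega, by omega⟩, List.getElem?_eq_getElem hi,
                target_getElem?_vowel l t.toNat hi hvt]
            · exact hout i hi (by omega)
        · intro i hi hrange
          exact hin i hi ⟨by omega, by omega⟩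
        · rw [(by omega : (h + 1).toNat = h.toNat + 1), (by omega : (t - 1 + 1).toNat = t.toNat)]
          omega
    · -- loop exit: h ≥ t, the array equals the target
      simp only [revAuxA, if_neg hlt]
      apply List.ext_getElem?
      intro i
      by_cases hi : i < l.length
      · by_cases hcase : (i : Int) < h ∨ t < (i : Int)
        · exact hout i hi hcase
        · have hieq : (i : Int) = h ∧ (i : Int) = t := by omega
          rw [hin i hi ⟨by omega, by omega⟩]
          by_cases hv : isVowel (l[i]'hi)
          · rw [target_getElem?_vowel l i hi hv, List.getElem?_eq_getElem hi]
          · have hv' : isVowel (l[i]'hi) = false := by simpa using hv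
            rw [target_getElem?_consonant l i hi hv']
            have e2 := cs_getElem?_at l i hi hv'
            have heq : cntC (l.drop (i + 1)) = cntC (l.take i) := by
              have : (t + 1).toNat = i + 1 := by omega
              rw [this] at hcnt
              have : h.toNat = i := by omega
              rw [this] at hcnt
              omega
            rw [heq, e2, List.getElem?_eq_getElem hi]
      · rw [List.getElem?_eq_none (by omega : a.length ≤ i),
          List.getElem?_eq_none (by rw [length_target]; omega)]

-- ===== VERDICT (by name: the statement is the Claim_ definition above) =====
theorem revStringOpt_spec : Claim_equal_revStringOpt := by
  intro a _
  show revStringOpt a = revStringOpt_alt a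
  unfold revStringOpt revStringOpt_alt
  dsimp only
  rw [popRefill_eq_refill]
  congr 1
  apply revAuxA_invariant a.toList _ a.toList 0 _ rfl (by omega) (by omega) (by omega)
  · intro i hi hcase
    exfalso
    omega
  · intro i _ _
    rfl
  · rw [(by omega : ((a.toList.length : Int) - 1 + 1).toNat = a.toList.length),
      List.drop_length]
    simp [cntC]
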